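-- pv_equiv track=rewrite | github.com/SunnyDutta172/CrisisSyncAI | server/app/logic.py | block_fire_area
-- ===== SOURCE A (Python) =====
-- def block_fire_area(grid, fire_pos, radius=2):
--     i, j = fire_pos
--
--     for dx in range(-radius, radius + 1):
--         for dy in range(-radius, radius + 1):
--             ni, nj = i + dx, j + dy
--             if 0 <= ni < len(grid) and 0 <= nj < len(grid[0]):
--                 grid[ni][nj] = 0
--
--     return grid
-- ===== SOURCE B (Python) =====
-- def block_fire_area(grid, fire_pos, radius=2):
--     i, j = fire_pos
--     r0, r1 = max(0, i - radius), min(len(grid), i + radius + 1)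
--     if r0 < r1:
--         c0 = max(0, j - radius)
--         c1 = min(len(grid[0]), j + radius + 1)
--         if c0 < c1:
--             zeros = [0] * (c1 - c0)
--             for ni in range(r0, r1):
--                 grid[ni][c0:c1] = zeros
--     return grid
-- ===== Notes on version B (the rewrite author's own statement) =====
-- stated objective: simpler
-- what changed: Replaces the (2r+1)^2 per-cell guarded double loop with a bounds-first computation of the clamped row/column window followed by one slice assignment per affected row.
import Mathlib
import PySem

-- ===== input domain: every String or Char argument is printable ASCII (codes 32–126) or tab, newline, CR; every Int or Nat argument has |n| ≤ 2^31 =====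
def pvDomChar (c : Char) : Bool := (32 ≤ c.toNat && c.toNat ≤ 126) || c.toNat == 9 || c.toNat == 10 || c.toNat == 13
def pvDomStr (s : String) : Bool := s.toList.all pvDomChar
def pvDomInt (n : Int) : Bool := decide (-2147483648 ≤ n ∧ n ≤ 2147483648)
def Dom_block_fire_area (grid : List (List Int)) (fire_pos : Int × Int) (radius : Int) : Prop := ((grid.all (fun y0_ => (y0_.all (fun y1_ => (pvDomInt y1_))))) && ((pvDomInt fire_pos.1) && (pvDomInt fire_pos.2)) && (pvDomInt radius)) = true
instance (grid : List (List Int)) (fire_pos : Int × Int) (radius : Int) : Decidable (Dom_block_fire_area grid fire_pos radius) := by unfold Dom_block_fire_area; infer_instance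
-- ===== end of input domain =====

-- B replaces A's guarded (2r+1)^2 per-cell double loop by computing the clamped row/column
-- window first and writing one zero slice per affected row (objective: simpler).
-- Both Pythons mutate `grid` in place identically and return it; the theorem is about the
-- returned (= mutated) value.

-- ===== PORT A =====
def block_fire_area (grid : List (List Int)) (fire_pos : Int × Int) (radius : Int) : List (List Int) :=
  let i := fire_pos.1
  let j := fire_pos.2
  (PySem.List.pyRange (-radius) (radius + 1) 1).foldl (fun g dx =>
    (PySem.List.pyRange (-radius) (radius + 1) 1).foldl (fun g dy =>
      let ni := i + dx
      let nj := j + dy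
      if 0 ≤ ni ∧ ni < (g.length : Int) ∧ 0 ≤ nj ∧ nj < ((g.headD []).length : Int) then
        g.modify ni.toNat (fun row => row.set nj.toNat 0)
      else g) g) grid

-- ===== PORT B =====
def block_fire_area_alt (grid : List (List Int)) (fire_pos : Int × Int) (radius : Int) : List (List Int) :=
  let i := fire_pos.1
  let j := fire_pos.2
  let r0 := max 0 (i - radius)
  let r1 := min (grid.length : Int) (i + radius + 1)
  if r0 < r1 then
    let c0 := max 0 (j - radius)
    let c1 := min ((grid.headD []).length : Int) (j + radius + 1)
    if c0 < c1 then
      let zeros := List.replicate (c1 - c0).toNat (0 : Int)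
      -- slice assignment grid[ni][c0:c1] = zeros (0 ≤ c0 < c1; take/drop clamp as the slice does)
      (PySem.List.pyRange r0 r1 1).foldl (fun g ni =>
        g.modify ni.toNat (fun row => row.take c0.toNat ++ zeros ++ row.drop c1.toNat)) grid
    else grid
  else grid

-- ===== PRECONDITION & SPEC =====
-- Pre_ excludes exactly the inputs on which Python A raises IndexError (grid[ni][nj] = 0 with
-- nj beyond a ragged row shorter than row 0 inside the affected window); A returns on all others.
def Pre_block_fire_area (grid : List (List Int)) (fire_pos : Int × Int) (radius : Int) : Prop :=
  let i := fire_pos.1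
  let j := fire_pos.2
  let r0 := max 0 (i - radius)
  let r1 := min (grid.length : Int) (i + radius + 1)
  let c0 := max 0 (j - radius)
  let c1 := min ((grid.headD []).length : Int) (j + radius + 1)
  c0 < c1 → ∀ k : Nat, k < grid.length → r0 ≤ (k : Int) → (k : Int) < r1 →
    c1 ≤ ((grid[k]?.getD []).length : Int)
instance (grid : List (List Int)) (fire_pos : Int × Int) (radius : Int) : Decidable (Pre_block_fire_area grid fire_pos radius) := by unfold Pre_block_fire_area; infer_instance

def pvWitness_block_fire_area : List (List Int) × (Int × Int) × Int := ([[1, 2], [3, 4]], (0, 1), 1)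

def Spec_block_fire_area (grid : List (List Int)) (fire_pos : Int × Int) (radius : Int) (out : List (List Int)) : Prop := out = block_fire_area_alt grid fire_pos radius
instance (grid : List (List Int)) (fire_pos : Int × Int) (radius : Int) (out : List (List Int)) : Decidable (Spec_block_fire_area grid fire_pos radius out) := by unfold Spec_block_fire_area; infer_instance

-- ===== CLAIM (what is proved, stated in full; the proofs are below) =====
def Claim_equal_block_fire_area : Prop := ∀ (grid : List (List Int)) (fire_pos : Int × Int) (radius : Int), Dom_block_fire_area grid fire_pos radius → Pre_block_fire_area grid fire_pos radius → Spec_block_fire_area grid fire_pos radius (block_fire_area grid fire_pos radius)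

-- ===== LEMMAS AND PROOFS =====

-- A's loop body on a single offset pair
def pvStep (i j : Int) (g : List (List Int)) (d : Int × Int) : List (List Int) :=
  let ni := i + d.1
  let nj := j + d.2
  if 0 ≤ ni ∧ ni < (g.length : Int) ∧ 0 ≤ nj ∧ nj < ((g.headD []).length : Int) then
    g.modify ni.toNat (fun row => row.set nj.toNat 0)
  else g

-- the flattened offset list of A's nested loops
def pvOffs (radius : Int) : List (Int × Int) :=
  (PySem.List.pyRange (-radius) (radius + 1) 1).flatMap (fun dx =>
    (PySem.List.pyRange (-radius) (radius + 1) 1).map (fun dy => (dx, dy)))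

theorem pvHeadD_eq (g : List (List Int)) : g.headD [] = g[0]?.getD [] := by
  cases g <;> simp

theorem pvNested (L1 L2 : List Int) (f : List (List Int) → Int × Int → List (List Int))
    (g : List (List Int)) :
    L1.foldl (fun g dx => L2.foldl (fun g dy => f g (dx, dy)) g) g
      = (L1.flatMap (fun dx => L2.map (fun dy => (dx, dy)))).foldl f g := by
  induction L1 generalizing g with
  | nil => rfl
  | cons a L1 ih => simp [List.foldl_append, List.foldl_map, ih]

theorem pvA_eq_foldl_offs (grid : List (List Int)) (i j radius : Int) :
    block_fire_area grid (i, j) radius = (pvOffs radius).foldl (pvStep i j) grid := by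
  exact pvNested _ _ (pvStep i j) grid

theorem pvStep_length (i j : Int) (g : List (List Int)) (d : Int × Int) :
    (pvStep i j g d).length = g.length := by
  unfold pvStep
  dsimp only
  split <;> simp

theorem pvStep_cell (i j : Int) (g : List (List Int)) (d : Int × Int) (k l : Nat) :
    ((pvStep i j g d)[k]?.getD [])[l]? =
      if (i + d.1 = (k : Int) ∧ j + d.2 = (l : Int)) ∧ (k : Int) < (g.length : Int) ∧
          (l : Int) < (((g.headD []).length : Nat) : Int) ∧ l < (g[k]?.getD []).length then
        some 0
      else (g[k]?.getD [])[l]? := by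
  unfold pvStep
  dsimp only
  split
  next h =>
    rw [List.getElem?_modify]
    cases hg : g[k]? with
    | none =>
      have hk : g.length ≤ k := List.getElem?_eq_none_iff.mp hg
      simp only [Option.map_eq_map, Option.map_none, Option.getD_none, List.getElem?_nil]
      rw [if_neg (fun hc => by omega)]
    | some row =>
      simp only [Option.map_eq_map, Option.map_some, Option.getD_some]
      obtain ⟨h1, h2, h3, h4⟩ := h
      by_cases hkk : (i + d.1).toNat = k
      · have hni : i + d.1 = (k : Int) := by omega
        rw [if_pos hkk, List.getElem?_set]
        by_cases hll : (j + d.2).toNat = l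
        · have hnj : j + d.2 = (l : Int) := by omega
          rw [if_pos hll, hll]
          by_cases hlr : l < row.length
          · rw [if_pos hlr, if_pos ⟨⟨hni, hnj⟩, by omega, by omega, hlr⟩]
          · rw [if_neg hlr, if_neg (fun hc => hlr hc.2.2.2)]
            exact (List.getElem?_eq_none (by omega)).symm
        · have hnj : ¬ (j + d.2 = (l : Int)) := by omega
          rw [if_neg hll, if_neg (fun hc => hnj hc.1.2)]
      · have hni : ¬ (i + d.1 = (k : Int)) := by omega
        rw [if_neg hkk, if_neg (fun hc => hni hc.1.1)]
  next h =>
    rw [if_neg (fun hc => h ⟨by omega, by omega, by omega, by omega⟩)]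

theorem pvStep_row_len (i j : Int) (g : List (List Int)) (d : Int × Int) (k : Nat) :
    ((pvStep i j g d)[k]?.getD []).length = (g[k]?.getD []).length := by
  unfold pvStep
  dsimp only
  split
  · simp only [List.getElem?_modify]
    cases g[k]? <;> simp
    split <;> simp
  · rfl

theorem pvStep_head_len (i j : Int) (g : List (List Int)) (d : Int × Int) :
    ((pvStep i j g d).headD []).length = (g.headD []).length := by
  rw [pvHeadD_eq, pvHeadD_eq]
  exact pvStep_row_len i j g d 0

theorem pvAfold_length (i j : Int) (P : List (Int × Int)) (g : List (List Int)) :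
    (P.foldl (pvStep i j) g).length = g.length := by
  induction P generalizing g with
  | nil => rfl
  | cons d P ih => simpa [pvStep_length] using ih (pvStep i j g d)

theorem pvIteIte {α : Type} (p q r : Prop) [Decidable p] [Decidable q] [Decidable r] (x y : α)
    (h : r ↔ p ∨ q) : (if p then x else if q then x else y) = if r then x else y := by
  split_ifs <;> tauto

theorem pvAfold_cell (i j : Int) (P : List (Int × Int)) (g : List (List Int)) (k l : Nat) :
    ((P.foldl (pvStep i j) g)[k]?.getD [])[l]? =
      if (∃ d ∈ P, i + d.1 = (k : Int) ∧ j + d.2 = (l : Int)) ∧ (k : Int) < (g.length : Int) ∧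
          (l : Int) < (((g.headD []).length : Nat) : Int) ∧ l < (g[k]?.getD []).length then
        some 0
      else (g[k]?.getD [])[l]? := by
  induction P generalizing g with
  | nil => simp
  | cons d P ih =>
    rw [List.foldl_cons, ih (pvStep i j g d), pvStep_length, pvStep_head_len, pvStep_row_len,
      pvStep_cell]
    have hcons : (∃ d' ∈ (d :: P), i + d'.1 = (k : Int) ∧ j + d'.2 = (l : Int)) ↔
        ((i + d.1 = (k : Int) ∧ j + d.2 = (l : Int)) ∨
          ∃ d' ∈ P, i + d'.1 = (k : Int) ∧ j + d'.2 = (l : Int)) := by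
      simp [List.mem_cons]
    refine pvIteIte _ _ _ _ _ ?_
    rw [hcons, or_and_right]
    exact or_comm

theorem pvBfold_get (srow : List Int → List Int) (a b : Int) (ha : 0 ≤ a)
    (g : List (List Int)) (k : Nat) :
    ((PySem.List.pyRange a b 1).foldl (fun g ni => g.modify ni.toNat srow) g)[k]? =
      if a ≤ (k : Int) ∧ (k : Int) < b then g[k]?.map srow else g[k]? := by
  have H : ∀ (n : Nat) (a : Int), (b - a).toNat = n → 0 ≤ a → ∀ (g : List (List Int)) (k : Nat),
      ((PySem.List.pyRange a b 1).foldl (fun g ni => g.modify ni.toNat srow) g)[k]? =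
        if a ≤ (k : Int) ∧ (k : Int) < b then g[k]?.map srow else g[k]? := by
    intro n
    induction n with
    | zero =>
      intro a hn ha g k
      rw [PySem.List.pyRange_one_eq_nil (by omega), List.foldl_nil, if_neg (by omega)]
    | succ n ih =>
      intro a hn ha g k
      rw [PySem.List.pyRange_one_cons (by omega), List.foldl_cons,
        ih (a + 1) (by omega) (by omega), List.getElem?_modify]
      by_cases hk : a.toNat = k
      · rw [if_neg (by omega), if_pos (by omega)]
        cases g[k]? <;> simp [hk]
      · have hiff : (a + 1 ≤ (k : Int) ∧ (k : Int) < b) ↔ (a ≤ (k : Int) ∧ (k : Int) < b) := by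
          omega
        rw [if_congr hiff rfl rfl]
        cases g[k]? <;> simp [hk]
  exact H (b - a).toNat a rfl ha g k

theorem pvHit_iff (radius i j k l : Int) :
    (∃ d ∈ pvOffs radius, i + d.1 = k ∧ j + d.2 = l) ↔
      (i - radius ≤ k ∧ k < i + radius + 1 ∧ j - radius ≤ l ∧ l < j + radius + 1) := by
  simp only [pvOffs, List.mem_flatMap, List.mem_map, PySem.List.mem_pyRange_one]
  constructor
  · rintro ⟨d, ⟨dx, hdx, dy, hdy, rfl⟩, h1, h2⟩
    simp only at h1 h2
    omega
  · rintro ⟨hk1, hk2, hl1, hl2⟩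
    exact ⟨(k - i, l - j), ⟨k - i, by omega, l - j, by omega, rfl⟩, by ring, by ring⟩

theorem pvSrow_cell (c0 c1 : Int) (h0 : 0 ≤ c0) (h01 : c0 < c1) (row : List Int)
    (hlen : c1 ≤ (row.length : Int)) (l : Nat) :
    (row.take c0.toNat ++ List.replicate (c1 - c0).toNat (0 : Int) ++ row.drop c1.toNat)[l]? =
      if c0 ≤ (l : Int) ∧ (l : Int) < c1 then some 0 else row[l]? := by
  have hlen : (row.take c0.toNat).length = c0.toNat := by simp; omega
  have hlen2 : (row.take c0.toNat ++ List.replicate (c1 - c0).toNat (0 : Int)).length = c1.toNat := by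
    simp; omega
  rw [List.getElem?_append, hlen2]
  by_cases hlc1 : l < c1.toNat
  · rw [if_pos hlc1, List.getElem?_append, hlen]
    by_cases hlc0 : l < c0.toNat
    · rw [if_pos hlc0, List.getElem?_take, if_pos (by omega), if_neg (by omega)]
    · rw [if_neg hlc0, List.getElem?_replicate, if_pos (by omega), if_pos (by omega)]
  · rw [if_neg hlc1, List.getElem?_drop, if_neg (by omega)]
    congr 1
    omega

theorem pvBfold_length (srow : List Int → List Int) (L : List Int) (g : List (List Int)) :
    (L.foldl (fun g ni => g.modify ni.toNat srow) g).length = g.length := by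
  induction L generalizing g with
  | nil => rfl
  | cons a L ih => simpa using ih (g.modify a.toNat srow)

theorem pvExt (g1 g2 : List (List Int)) (hlen : g1.length = g2.length)
    (hcell : ∀ k l : Nat, (g1[k]?.getD [])[l]? = (g2[k]?.getD [])[l]?) : g1 = g2 := by
  apply List.ext_getElem?
  intro k
  by_cases hk : k < g1.length
  · rw [List.getElem?_eq_getElem hk, List.getElem?_eq_getElem (by omega)]
    congr 1
    apply List.ext_getElem?
    intro l
    simpa [List.getElem?_eq_getElem hk, List.getElem?_eq_getElem (show k < g2.length by omega)]
      using hcell k l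
  · rw [List.getElem?_eq_none (by omega), List.getElem?_eq_none (by omega)]

-- ===== VERDICT (by name: the statement is the Claim_ definition above) =====
theorem block_fire_area_spec : Claim_equal_block_fire_area := by
  intro grid fire_pos radius _hdom hpre
  obtain ⟨i, j⟩ := fire_pos
  unfold Spec_block_fire_area
  unfold Pre_block_fire_area at hpre
  dsimp only at hpre
  rw [pvA_eq_foldl_offs]
  unfold block_fire_area_alt
  dsimp only
  by_cases h1 : max 0 (i - radius) < min ((grid.length : Nat) : Int) (i + radius + 1)
  · rw [if_pos h1]
    by_cases h2 : max 0 (j - radius) < min (((grid.headD []).length : Nat) : Int) (j + radius + 1)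
    · rw [if_pos h2]
      refine pvExt _ _ (by rw [pvAfold_length, pvBfold_length]) ?_
      intro k l
      rw [pvAfold_cell, pvBfold_get _ _ _ (by omega)]
      by_cases hw : max 0 (i - radius) ≤ (k : Int) ∧
          (k : Int) < min ((grid.length : Nat) : Int) (i + radius + 1)
      · rw [if_pos hw]
        have hk : k < grid.length := by omega
        cases hg : grid[k]? with
        | none => exact absurd (List.getElem?_eq_none_iff.mp hg) (by omega)
        | some row =>
          have hrow : min (((grid.headD []).length : Nat) : Int) (j + radius + 1) ≤ (row.length : Int) := by
            have := hpre h2 k hk hw.1 hw.2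
            rwa [hg] at this
          simp only [Option.map_some, Option.getD_some]
          rw [pvSrow_cell _ _ (by omega) h2 row hrow]
          refine if_congr ?_ rfl rfl
          rw [pvHit_iff]
          constructor
          · rintro ⟨⟨ha1, ha2, ha3, ha4⟩, hb, hc, hd⟩
            omega
          · rintro ⟨hc0, hc1⟩
            refine ⟨⟨by omega, by omega, by omega, by omega⟩, by omega, by omega, by omega⟩
      · rw [if_neg hw, if_neg]
        rintro ⟨hhit, hb, hc, hd⟩
        rw [pvHit_iff] at hhit
        omega
    · rw [if_neg h2]
      refine pvExt _ _ (pvAfold_length i j _ grid) ?_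
      intro k l
      rw [pvAfold_cell, if_neg]
      rintro ⟨hhit, hb, hc, hd⟩
      rw [pvHit_iff] at hhit
      omega
  · rw [if_neg h1]
    refine pvExt _ _ (pvAfold_length i j _ grid) ?_
    intro k l
    rw [pvAfold_cell, if_neg]
    rintro ⟨hhit, hb, hc, hd⟩
    rw [pvHit_iff] at hhit
    omega
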